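-- pv_equiv track=rewrite | github.com/NotHotTryHard/YaAlgs6.0 | HW4/F.py | func
-- ===== SOURCE A (Python) =====
-- from collections import defaultdict
--
-- def func(corps, masters):
--     graph = defaultdict(list)
--     for i, master in enumerate(masters):
--         graph[master - 1].append(i + 1)
--     #graph[0].append(1)
--
--     subtree_sizes = [0] * corps
--     def dfs(node):
--         subtree_size = 1
--         count = 0
--         for neighbor in graph[node]:
--             subsubtree_size, subcount = dfs(neighbor)
--             subtree_size += subsubtree_size
--             count += subcount
--         count += subtree_size
--         subtree_sizes[node] = count
--         return subtree_size, count
--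
--     sub_size = dfs(0)
--     return subtree_sizes
-- ===== SOURCE B (Python) =====
-- def func(corps, masters):
--     # Per-node parent-chain walk: res[a] += d+1 for each node m whose chain to the
--     # root passes through a at distance d (count(n) = sum over subtree of sizes).
--     n = len(masters)
--     res = [0] * corps
--     for m in range(n + 1):
--         chain = []
--         cur = m
--         ok = False
--         for _ in range(n + 1):
--             chain.append(cur)
--             if cur == 0:
--                 ok = True
--                 break
--             if cur < 1 or cur > n:
--                 break
--             cur = masters[cur - 1] - 1
--         if ok:
--             for d, a in enumerate(chain):
--                 res[a] += d + 1
--     return res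
-- ===== Notes on version B (the rewrite author's own statement) =====
-- stated objective: alternative
-- what changed: Replaces the recursive DFS over a children adjacency dict with independent parent-chain walks: each node m walks its master chain to the root and adds d+1 to the answer of its ancestor at distance d (identity: the subtree-size sum at n equals the sum over descendants m of depth(m)-depth(n)+1); no recursion and no adjacency structure.
import Mathlib
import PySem

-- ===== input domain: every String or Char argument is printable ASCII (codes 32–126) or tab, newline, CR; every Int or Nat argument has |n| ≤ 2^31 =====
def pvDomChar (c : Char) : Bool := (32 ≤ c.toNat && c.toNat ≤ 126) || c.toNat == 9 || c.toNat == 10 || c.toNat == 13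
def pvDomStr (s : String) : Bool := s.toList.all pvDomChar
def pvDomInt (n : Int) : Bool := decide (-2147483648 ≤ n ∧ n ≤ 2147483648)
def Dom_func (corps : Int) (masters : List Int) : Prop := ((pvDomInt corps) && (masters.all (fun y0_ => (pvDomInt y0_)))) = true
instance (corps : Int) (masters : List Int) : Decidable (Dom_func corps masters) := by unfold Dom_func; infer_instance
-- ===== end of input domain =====

-- B replaces A's recursive DFS by independent parent-chain walks (alternative
-- decomposition, same return value; A's in-place writes are internal to A).

-- ===== PORT A =====
-- graph = defaultdict(list); for i, master in enumerate(masters): graph[master-1].append(i+1)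
def pvGraphA (masters : List Int) : PySem.Dict Int (List Int) :=
  (PySem.List.enumerate masters 0).foldl
    (fun g p => g.modify (p.2 - 1) [] (fun l => l ++ [p.1 + 1])) PySem.Dict.empty

-- def dfs(node): … (fuel only makes the recursion structural; under Pre_func the
-- reachable part of the graph is a tree of ≤ len(masters)+1 nodes, so fuel never runs out)
def pvDfsA (g : PySem.Dict Int (List Int)) : Nat → Int → List Int → Int × Int × List Int
  | 0, _, sizes => (0, 0, sizes)
  | f + 1, node, sizes =>
    let r := (g.getD node []).foldl
      (fun (acc : Int × Int × List Int) nb =>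
        let s := pvDfsA g f nb acc.2.2
        (acc.1 + s.1, acc.2.1 + s.2.1, s.2.2)) (1, 0, sizes)
    let count := r.2.1 + r.1
    (r.1, count, PySem.List.pySetD r.2.2 node count)

def func (corps : Int) (masters : List Int) : List Int :=
  (pvDfsA (pvGraphA masters) (masters.length + 1) 0 (List.replicate corps.toNat 0)).2.2

-- ===== PORT B =====
-- the inner walk: chain = []; cur = m; for _ in range(n+1): append cur; stop at 0 (ok) or leave
def pvWalkB (masters : List Int) : Nat → Int → List Int → List Int × Bool
  | 0, _, chain => (chain, false)
  | f + 1, cur, chain =>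
    let chain := chain ++ [cur]
    if cur = 0 then (chain, true)
    else if cur < 1 ∨ (masters.length : Int) < cur then (chain, false)
    else pvWalkB masters f (PySem.List.pyGetD masters (cur - 1) 0 - 1) chain

-- for d, a in enumerate(chain): res[a] += d + 1
def pvAddChainB (res chain : List Int) : List Int :=
  (PySem.List.enumerate chain 0).foldl
    (fun r p => PySem.List.pySetD r p.2 (PySem.List.pyGetD r p.2 0 + (p.1 + 1))) res

def func_alt (corps : Int) (masters : List Int) : List Int :=
  (PySem.List.pyRange 0 ((masters.length : Int) + 1) 1).foldl
    (fun res m =>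
      let w := pvWalkB masters (masters.length + 1) m []
      if w.2 then pvAddChainB res w.1 else res)
    (List.replicate corps.toNat 0)

-- ===== PRECONDITION & SPEC =====
-- the parent map: node m's master is masters[m-1]; -1 is a dead state (no parent)
def pvPar (masters : List Int) (m : Int) : Int :=
  if 1 ≤ m ∧ m ≤ (masters.length : Int) then PySem.List.pyGetD masters (m - 1) 0 - 1 else -1

-- A raises IndexError on subtree_sizes[node] iff corps < 1 (dfs(0) always writes index 0) or
-- some node reachable from the root (some iterate of the parent map sends it to 0) is ≥ corps;
-- Pre_func excludes exactly those inputs.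
def Pre_func (corps : Int) (masters : List Int) : Prop :=
  1 ≤ corps ∧
    ∀ k ∈ List.range (masters.length + 1),
      (∃ j ∈ List.range (masters.length + 1), (pvPar masters)^[j] (k : Int) = 0) →
        (k : Int) < corps

instance (corps : Int) (masters : List Int) : Decidable (Pre_func corps masters) := by
  unfold Pre_func; infer_instance

def pvWitness_func : Int × List Int := (3, [1, 1])

def Spec_func (corps : Int) (masters : List Int) (out : List Int) : Prop := out = func_alt corps masters
instance (corps : Int) (masters : List Int) (out : List Int) : Decidable (Spec_func corps masters out) := by unfold Spec_func; infer_instance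

-- ===== CLAIM (what is proved, stated in full; the proofs are below) =====
def Claim_equal_func : Prop := ∀ (corps : Int) (masters : List Int), Dom_func corps masters → Pre_func corps masters → Spec_func corps masters (func corps masters)

-- ===== LEMMAS AND PROOFS =====

-- the chain from m to the root, if it exists (proof-side canonical form of the walk)
def pvChn (masters : List Int) : Nat → Int → Option (List Int)
  | 0, _ => none
  | f + 1, m =>
    if m = 0 then some [0]
    else if m < 1 ∨ (masters.length : Int) < m then none
    else (pvChn masters f (PySem.List.pyGetD masters (m - 1) 0 - 1)).map (m :: ·)

def pvChainN (masters : List Int) (m : Int) : Option (List Int) :=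
  pvChn masters (masters.length + 1) m

-- the children of n in A's graph
def pvKids (masters : List Int) (n : Int) : List Int :=
  (PySem.List.enumerate masters 0).filterMap
    (fun p => if p.2 - 1 = n then some (p.1 + 1) else none)

-- contribution of node m to node k (= d+1 if k is the d-th ancestor of m, else 0)
def pvWgt (masters : List Int) (m k : Int) : Int :=
  match pvChainN masters m with
  | some l => match l.idxOf? k with
    | some d => (d : Int) + 1
    | none => 0
  | none => 0

def pvInd (masters : List Int) (m k : Int) : Int :=
  match pvChainN masters m with
  | some l => if k ∈ l then 1 else 0
  | none => 0

def pvS (masters : List Int) (k : Int) : Int :=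
  ((List.range (masters.length + 1)).map (fun m : Nat => pvInd masters (m : Int) k)).sum

def pvW (masters : List Int) (k : Int) : Int :=
  ((List.range (masters.length + 1)).map (fun m : Nat => pvWgt masters (m : Int) k)).sum

-- ----- chain basics -----
lemma chn_head {masters : List Int} {f : Nat} {m : Int} {l : List Int}
    (h : pvChn masters f m = some l) : ∃ t, l = m :: t := by
  cases f with
  | zero => simp [pvChn] at h
  | succ f =>
    by_cases h0 : m = 0
    · subst h0; simp [pvChn] at h; exact ⟨[], h.symm⟩
    · by_cases hr : m < 1 ∨ (masters.length : Int) < m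
      · simp [pvChn, h0, hr] at h
      · simp [pvChn, h0, hr] at h
        rcases h with ⟨t, _, rfl⟩; exact ⟨t, rfl⟩

lemma chn_fuel_ge {masters : List Int} {f f' : Nat} {m : Int} {l : List Int}
    (hf : f ≤ f') (h : pvChn masters f m = some l) : pvChn masters f' m = some l := by
  induction f generalizing f' m l with
  | zero => simp [pvChn] at h
  | succ f ih =>
    obtain ⟨f', rfl⟩ : ∃ g, f' = g + 1 := ⟨f' - 1, by omega⟩
    by_cases h0 : m = 0
    · simpa [pvChn, h0] using h
    · by_cases hr : m < 1 ∨ (masters.length : Int) < m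
      · simp [pvChn, h0, hr] at h
      · simp only [pvChn, if_neg h0, if_neg hr] at h ⊢
        rcases Option.map_eq_some_iff.mp h with ⟨t, ht, rfl⟩
        rw [ih (by omega) ht]; rfl

lemma chn_unique {masters : List Int} {f f' : Nat} {m : Int} {l l' : List Int}
    (h : pvChn masters f m = some l) (h' : pvChn masters f' m = some l') : l = l' := by
  rcases Nat.le_total f f' with hle | hle
  · have h2 := chn_fuel_ge hle h; rw [h2] at h'; injection h'
  · have h2 := chn_fuel_ge hle h'; rw [h2] at h; exact (Option.some.inj h).symm

lemma chn_zero_mem {masters : List Int} {f : Nat} {m : Int} {l : List Int}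
    (h : pvChn masters f m = some l) : (0 : Int) ∈ l := by
  induction f generalizing m l with
  | zero => simp [pvChn] at h
  | succ f ih =>
    by_cases h0 : m = 0
    · simp [pvChn, h0] at h; simp [← h]
    · by_cases hr : m < 1 ∨ (masters.length : Int) < m
      · simp [pvChn, h0, hr] at h
      · simp only [pvChn, if_neg h0, if_neg hr] at h
        rcases Option.map_eq_some_iff.mp h with ⟨t, ht, rfl⟩
        exact List.mem_cons_of_mem _ (ih ht)

lemma chn_elem_bounds {masters : List Int} {f : Nat} {m : Int} {l : List Int}
    (h : pvChn masters f m = some l) : ∀ x ∈ l, 0 ≤ x ∧ x ≤ (masters.length : Int) := by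
  induction f generalizing m l with
  | zero => simp [pvChn] at h
  | succ f ih =>
    by_cases h0 : m = 0
    · simp [pvChn, h0] at h; intro x hx; simp [← h] at hx; simp [hx]
    · by_cases hr : m < 1 ∨ (masters.length : Int) < m
      · simp [pvChn, h0, hr] at h
      · simp only [pvChn, if_neg h0, if_neg hr] at h
        rcases Option.map_eq_some_iff.mp h with ⟨t, ht, rfl⟩
        intro x hx
        rcases List.mem_cons.mp hx with rfl | hx
        · push Not at hr; omega
        · exact ih ht x hx

lemma chn_elem_occ {masters : List Int} {f : Nat} {m : Int} {a b : List Int} {k : Int}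
    (h : pvChn masters f m = some (a ++ k :: b)) : pvChn masters f k = some (k :: b) := by
  induction f generalizing m a with
  | zero => simp [pvChn] at h
  | succ f ih =>
    by_cases h0 : m = 0
    · subst h0
      simp [pvChn] at h
      cases a with
      | nil => simp at h; simp [pvChn, ← h.1, ← h.2]
      | cons x a => cases a <;> simp_all
    · by_cases hr : m < 1 ∨ (masters.length : Int) < m
      · simp [pvChn, h0, hr] at h
      · have h' := h
        simp only [pvChn, if_neg h0, if_neg hr] at h'
        rcases Option.map_eq_some_iff.mp h' with ⟨t, ht, hmt⟩
        cases a with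
        | nil => simp at hmt; exact hmt.1 ▸ h
        | cons x a =>
          simp at hmt
          obtain ⟨rfl, rfl⟩ := hmt
          exact chn_fuel_ge (Nat.le_succ f) (ih ht)

lemma chn_nodup {masters : List Int} {f : Nat} {m : Int} {l : List Int}
    (h : pvChn masters f m = some l) : l.Nodup := by
  induction f generalizing m l with
  | zero => simp [pvChn] at h
  | succ f ih =>
    by_cases h0 : m = 0
    · simp [pvChn, h0] at h; simp [← h]
    · by_cases hr : m < 1 ∨ (masters.length : Int) < m
      · simp [pvChn, h0, hr] at h
      · have h' := h
        simp only [pvChn, if_neg h0, if_neg hr] at h'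
        rcases Option.map_eq_some_iff.mp h' with ⟨t, ht, rfl⟩
        refine List.nodup_cons.mpr ⟨?_, ih ht⟩
        intro hm
        rcases List.append_of_mem hm with ⟨s, u, hsu⟩
        have h1 : pvChn masters f m = some (m :: u) := chn_elem_occ (hsu ▸ ht)
        have h2 := chn_unique h1 h
        rw [hsu] at h2
        have : (m :: u).length = (m :: (s ++ m :: u)).length := congrArg List.length h2
        simp at this; omega

-- ----- fuel adequacy and kids -----
lemma chn_length_le {masters : List Int} {f : Nat} {m : Int} {l : List Int}
    (h : pvChn masters f m = some l) : l.length ≤ masters.length + 1 := by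
  have hnd : (l.map Int.toNat).Nodup := by
    refine (chn_nodup h).map_on ?_
    intro x hx y hy hxy
    have hx' := (chn_elem_bounds h x hx).1
    have hy' := (chn_elem_bounds h y hy).1
    omega
  have hsub : (l.map Int.toNat).toFinset ⊆ Finset.range (masters.length + 1) := by
    intro x hx
    simp only [List.mem_toFinset, List.mem_map] at hx
    rcases hx with ⟨y, hy, rfl⟩
    have := chn_elem_bounds h y hy
    simp only [Finset.mem_range]; omega
  have hcard := Finset.card_le_card hsub
  rw [List.toFinset_card_of_nodup hnd, Finset.card_range] at hcard
  simpa using hcard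

lemma chn_min_fuel {masters : List Int} {f : Nat} {m : Int} {l : List Int}
    (h : pvChn masters f m = some l) : pvChn masters l.length m = some l := by
  induction f generalizing m l with
  | zero => simp [pvChn] at h
  | succ f ih =>
    by_cases h0 : m = 0
    · simp [pvChn, h0] at h; simp [← h, pvChn, h0]
    · by_cases hr : m < 1 ∨ (masters.length : Int) < m
      · simp [pvChn, h0, hr] at h
      · simp only [pvChn, if_neg h0, if_neg hr] at h
        rcases Option.map_eq_some_iff.mp h with ⟨t, ht, rfl⟩
        have := ih ht
        simp only [List.length_cons, pvChn, if_neg h0, if_neg hr, this]; rfl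

lemma chn_to_chainN {masters : List Int} {f : Nat} {m : Int} {l : List Int}
    (h : pvChn masters f m = some l) : pvChainN masters m = some l :=
  chn_fuel_ge (chn_length_le h) (chn_min_fuel h)

lemma mem_kids {masters : List Int} {n c : Int} :
    c ∈ pvKids masters n ↔ ∃ (k : Nat) (_ : k < masters.length), c = (k : Int) + 1 ∧ masters[k] - 1 = n := by
  simp only [pvKids, List.mem_filterMap, PySem.List.mem_enumerate_iff]
  constructor
  · rintro ⟨p, ⟨k, hk, rfl⟩, hif⟩
    simp only [zero_add] at hif
    split at hif
    · rename_i he; exact ⟨k, hk, (Option.some.inj hif).symm, he⟩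
    · simp at hif
  · rintro ⟨k, hk, rfl, he⟩
    refine ⟨((k : Int), masters[k]), ⟨k, hk, by simp⟩, ?_⟩
    simp [he]

lemma kids_par {masters : List Int} {n c : Int} (hc : c ∈ pvKids masters n) :
    1 ≤ c ∧ c ≤ (masters.length : Int) ∧ PySem.List.pyGetD masters (c - 1) 0 - 1 = n := by
  rcases mem_kids.mp hc with ⟨k, hk, rfl, he⟩
  refine ⟨by omega, by omega, ?_⟩
  have : ((k : Int) + 1 - 1) = (k : Int) := by omega
  rw [this, PySem.List.pyGetD_natCast, List.getD_eq_getElem _ _ hk, he]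

lemma par_kids {masters : List Int} {n c : Int} (h1 : 1 ≤ c) (h2 : c ≤ (masters.length : Int))
    (h3 : PySem.List.pyGetD masters (c - 1) 0 - 1 = n) : c ∈ pvKids masters n := by
  refine mem_kids.mpr ⟨(c - 1).toNat, by omega, by omega, ?_⟩
  rw [← h3]
  rw [PySem.List.pyGetD_eq_getElem masters 0 (by omega) (by omega)]

lemma kids_nodup {masters : List Int} {n : Int} : (pvKids masters n).Nodup := by
  have hp : (PySem.List.enumerate masters 0).Pairwise (fun p q => p.1 < q.1) :=
    PySem.List.pairwise_lt_enumerate masters 0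
  unfold pvKids List.Nodup
  rw [List.pairwise_filterMap]
  refine hp.imp_of_mem ?_
  intro p q _ _ hlt x hx y hy
  (split at hx <;> split at hy <;> simp_all)
  omega

lemma chn_kid {masters : List Int} {f : Nat} {n c : Int} {ln : List Int}
    (hc : c ∈ pvKids masters n) (hn : pvChn masters f n = some ln) :
    pvChn masters (f + 1) c = some (c :: ln) := by
  obtain ⟨h1, h2, h3⟩ := kids_par hc
  simp only [pvChn, if_neg (by omega : ¬ c = 0), if_neg (by omega : ¬ (c < 1 ∨ (masters.length : Int) < c)), h3, hn]
  rfl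

lemma chainN_kid {masters : List Int} {n c : Int} {ln : List Int}
    (hc : c ∈ pvKids masters n) (hn : pvChainN masters n = some ln) :
    pvChainN masters c = some (c :: ln) :=
  chn_to_chainN (chn_kid hc hn)

lemma kid_of_adjacent {masters : List Int} {f : Nat} {m c n : Int} {a b : List Int}
    (h : pvChn masters f m = some (a ++ c :: n :: b)) : c ∈ pvKids masters n := by
  have h1 : pvChn masters f c = some (c :: n :: b) := chn_elem_occ h
  cases f with
  | zero => simp [pvChn] at h1
  | succ f =>
    by_cases h0 : c = 0
    · simp [pvChn, h0] at h1
    · by_cases hr : c < 1 ∨ (masters.length : Int) < c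
      · simp [pvChn, h0, hr] at h1
      · simp only [pvChn, if_neg h0, if_neg hr] at h1
        rcases Option.map_eq_some_iff.mp h1 with ⟨t, ht, hmt⟩
        have : t = n :: b := by simpa using hmt
        subst this
        rcases chn_head ht with ⟨t', ht'⟩
        injection ht' with hh _
        exact par_kids (by omega) (by omega) hh.symm
  
lemma par_iter_zero_of_chn {masters : List Int} {f : Nat} {m : Int} {l : List Int}
    (h : pvChn masters f m = some l) : (pvPar masters)^[l.length - 1] m = 0 := by
  induction f generalizing m l with
  | zero => simp [pvChn] at h
  | succ f ih =>
    by_cases h0 : m = 0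
    · simp [pvChn, h0] at h
      simp [← h, h0]
    · by_cases hr : m < 1 ∨ (masters.length : Int) < m
      · simp [pvChn, h0, hr] at h
      · simp only [pvChn, if_neg h0, if_neg hr] at h
        rcases Option.map_eq_some_iff.mp h with ⟨t, ht, rfl⟩
        have htlen : 1 ≤ t.length := by
          rcases chn_head ht with ⟨t', rfl⟩; simp
        have hstep : pvPar masters m = PySem.List.pyGetD masters (m - 1) 0 - 1 := by
          unfold pvPar
          rw [if_pos (by omega)]
        have : (m :: t).length - 1 = (t.length - 1) + 1 := by simp; omega
        rw [this, Function.iterate_succ_apply, hstep]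
        exact ih ht

lemma chainN_lt_corps {corps : Int} {masters : List Int} {m : Int} {l : List Int}
    (hpre : Pre_func corps masters) (h : pvChainN masters m = some l) : 0 ≤ m ∧ m < corps := by
  rcases chn_head h with ⟨t, rfl⟩
  have hb := chn_elem_bounds h m (by simp)
  have hlen := chn_length_le h
  have hm : m.toNat ∈ List.range (masters.length + 1) := by
    simp only [List.mem_range]; omega
  have hiter := par_iter_zero_of_chn h
  have := hpre.2 m.toNat hm
    ⟨(m :: t).length - 1, by simp only [List.mem_range]; simp at hlen ⊢; omega,
      by rwa [Int.toNat_of_nonneg hb.1]⟩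
  omega

lemma chainN_of_mem {masters : List Int} {m x : Int} {l : List Int}
    (h : pvChainN masters m = some l) (hx : x ∈ l) : ∃ b, pvChainN masters x = some (x :: b) := by
  rcases List.append_of_mem hx with ⟨s, t, rfl⟩
  exact ⟨t, chn_to_chainN (chn_elem_occ h)⟩

-- ----- generic sum and index helpers -----
lemma sum_map_zero_of {α : Type} {xs : List α} {f : α → Int}
    (h : ∀ x ∈ xs, f x = 0) : (xs.map f).sum = 0 := by
  induction xs with
  | nil => simp
  | cons x xs ih =>
    simp only [List.map_cons, List.sum_cons, h x (by simp)]
    rw [ih (fun y hy => h y (by simp [hy]))]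
    simp

lemma sum_map_single {α : Type} {xs : List α} {f : α → Int} {x₀ : α}
    (hx : x₀ ∈ xs) (hnd : xs.Nodup)
    (hz : ∀ y ∈ xs, y ≠ x₀ → f y = 0) : (xs.map f).sum = f x₀ := by
  induction xs with
  | nil => simp at hx
  | cons x xs ih =>
    rcases List.mem_cons.mp hx with rfl | hx'
    · simp only [List.map_cons, List.sum_cons]
      rw [sum_map_zero_of (fun y hy => hz y (by simp [hy]) (fun hc => (List.nodup_cons.mp hnd).1 (hc ▸ hy)))]
      simp
    · simp only [List.map_cons, List.sum_cons]
      rw [hz x (by simp) (fun hc => (List.nodup_cons.mp hnd).1 (hc ▸ hx')),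
        ih hx' (List.nodup_cons.mp hnd).2 (fun y hy hne => hz y (by simp [hy]) hne)]
      simp

lemma sum_map_swap {α β : Type} (A : List α) (B : List β) (g : α → β → Int) :
    (A.map (fun m => (B.map (fun c => g m c)).sum)).sum
      = (B.map (fun c => (A.map (fun m => g m c)).sum)).sum := by
  induction A with
  | nil => simp
  | cons a A ih =>
    simp only [List.map_cons, List.sum_cons, ih, ← List.sum_map_add]

lemma idxOf?_append_cons {a b : List Int} {x : Int} (hnd : (a ++ x :: b).Nodup) :
    (a ++ x :: b).idxOf? x = some a.length := by
  induction a with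
  | nil => simp [List.idxOf?_cons]
  | cons y a ih =>
    have hy : y ≠ x := by
      intro h; subst h
      exact (List.nodup_cons.mp hnd).1 (by simp)
    simp only [List.cons_append, List.idxOf?_cons, beq_iff_eq, if_neg hy,
      ih (List.nodup_cons.mp hnd).2, Option.map_some, List.length_cons]

-- ----- structure of chains around a node n -----
lemma kid_chain_of_mem {masters : List Int} {n c : Int} {ln l : List Int} {m : Int}
    (hn : pvChainN masters n = some ln) (hm : pvChainN masters m = some l)
    (hc : c ∈ pvKids masters n) (hcl : c ∈ l) : ∃ a, l = a ++ c :: ln := by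
  rcases List.append_of_mem hcl with ⟨a, b, rfl⟩
  have h1 : pvChainN masters c = some (c :: b) := chn_to_chainN (chn_elem_occ hm)
  have h2 : pvChainN masters c = some (c :: ln) := chainN_kid hc hn
  rw [h1] at h2
  injection h2 with h2
  injection h2 with _ h2
  exact ⟨a, by rw [h2]⟩

lemma mem_of_kid_mem {masters : List Int} {n c : Int} {ln l : List Int} {m : Int}
    (hn : pvChainN masters n = some ln) (hm : pvChainN masters m = some l)
    (hc : c ∈ pvKids masters n) (hcl : c ∈ l) : n ∈ l := by
  rcases kid_chain_of_mem hn hm hc hcl with ⟨a, rfl⟩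
  rcases chn_head hn with ⟨t, rfl⟩
  simp

lemma kid_unique {masters : List Int} {n c₁ c₂ : Int} {ln l : List Int} {m : Int}
    (hn : pvChainN masters n = some ln) (hm : pvChainN masters m = some l)
    (hc₁ : c₁ ∈ pvKids masters n) (h₁ : c₁ ∈ l)
    (hc₂ : c₂ ∈ pvKids masters n) (h₂ : c₂ ∈ l) : c₁ = c₂ := by
  rcases kid_chain_of_mem hn hm hc₁ h₁ with ⟨a₁, he₁⟩
  rcases kid_chain_of_mem hn hm hc₂ h₂ with ⟨a₂, he₂⟩
  have hlen : a₁.length = a₂.length := by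
    have := congrArg List.length (he₁ ▸ he₂)
    simp at this; omega
  have := List.append_inj (he₁ ▸ he₂) hlen
  exact (List.cons.injEq .. ▸ this.2).1

lemma exists_kid_of_mem {masters : List Int} {n m : Int} {ln l : List Int}
    (_hn : pvChainN masters n = some ln) (hm : pvChainN masters m = some l)
    (hne : m ≠ n) (hnl : n ∈ l) : ∃ c ∈ pvKids masters n, c ∈ l := by
  rcases List.append_of_mem hnl with ⟨a, b, rfl⟩
  rcases chn_head hm with ⟨t, ht⟩
  cases a with
  | nil => simp at ht; exact absurd ht.1.symm hne
  | cons x a' =>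
    rcases List.eq_nil_or_concat (x :: a') with h | ⟨a'', c, hc⟩
    · simp at h
    · rw [hc] at hm ⊢
      have : a''.concat c ++ n :: b = a'' ++ c :: n :: b := by simp
      rw [this] at hm
      exact ⟨c, kid_of_adjacent hm, by simp⟩

lemma kid_idx {masters : List Int} {n c m : Int} {ln l : List Int}
    (hn : pvChainN masters n = some ln) (hm : pvChainN masters m = some l)
    (hc : c ∈ pvKids masters n) (hcl : c ∈ l) :
    ∃ d : Nat, l.idxOf? c = some d ∧ l.idxOf? n = some (d + 1) := by
  rcases kid_chain_of_mem hn hm hc hcl with ⟨a, rfl⟩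
  rcases chn_head hn with ⟨t, rfl⟩
  have hnd : (a ++ c :: n :: t).Nodup := chn_nodup hm
  refine ⟨a.length, idxOf?_append_cons hnd, ?_⟩
  have : a ++ c :: n :: t = (a ++ [c]) ++ n :: t := by simp
  rw [this] at hnd ⊢
  rw [idxOf?_append_cons hnd]
  simp

-- ----- pointwise recursion identities -----
lemma kid_not_mem_own {masters : List Int} {n c : Int} {ln : List Int}
    (hn : pvChainN masters n = some ln) (hc : c ∈ pvKids masters n) : c ∉ ln := by
  intro hcl
  rcases kid_chain_of_mem hn hn hc hcl with ⟨a, ha⟩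
  have := congrArg List.length ha
  simp at this
  omega

lemma pointwise_ind {masters : List Int} {n : Int} {ln : List Int}
    (hn : pvChainN masters n = some ln) (m : Int) :
    pvInd masters m n = (if m = n then 1 else 0)
      + ((pvKids masters n).map (fun c => pvInd masters m c)).sum := by
  unfold pvInd
  cases hm : pvChainN masters m with
  | none =>
    have hmn : m ≠ n := fun h => by rw [h, hn] at hm; cases hm
    rw [sum_map_zero_of (by intro c _; simp), if_neg hmn]
    simp
  | some l =>
    simp only []
    by_cases hmem : n ∈ l
    · by_cases hmn : m = n
      · have hl : l = ln := by rw [hmn, hn] at hm; exact (Option.some.inj hm).symm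
        subst hl
        rw [if_pos hmem, if_pos hmn, sum_map_zero_of]
        · simp
        · intro c hc
          rw [if_neg (kid_not_mem_own hn hc)]
      · rcases exists_kid_of_mem hn hm hmn hmem with ⟨c₀, hc₀, hc₀l⟩
        rw [if_pos hmem, if_neg hmn,
          sum_map_single hc₀ kids_nodup
            (by intro c hc hne
                rw [if_neg (fun hcl => hne (kid_unique hn hm hc hcl hc₀ hc₀l))]),
          if_pos hc₀l]
        omega
    · have hmn : m ≠ n := by
        intro h; subst h
        rw [hn] at hm; injection hm with hm; subst hm
        rcases chn_head hn with ⟨t, rfl⟩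
        simp at hmem
      rw [if_neg hmem, if_neg hmn, sum_map_zero_of]
      · simp
      · intro c hc
        rw [if_neg (fun hcl => hmem (mem_of_kid_mem hn hm hc hcl))]

lemma pointwise_wgt {masters : List Int} {n : Int} {ln : List Int}
    (hn : pvChainN masters n = some ln) (m : Int) :
    pvWgt masters m n = pvInd masters m n
      + ((pvKids masters n).map (fun c => pvWgt masters m c)).sum := by
  unfold pvWgt pvInd
  cases hm : pvChainN masters m with
  | none => rw [sum_map_zero_of (by intro c _; simp)]; simp
  | some l =>
    simp only []
    by_cases hmem : n ∈ l
    · by_cases hmn : m = n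
      · have hl : l = ln := by rw [hmn, hn] at hm; exact (Option.some.inj hm).symm
        rcases chn_head hn with ⟨t, hlt⟩
        have hl2 : l = [] ++ n :: t := by simp [hl, hlt]
        have hidx : l.idxOf? n = some 0 := by
          rw [hl2]
          simpa using idxOf?_append_cons (hl2 ▸ chn_nodup hm)
        rw [hidx, if_pos hmem, sum_map_zero_of]
        · simp
        · intro c hc
          rw [List.idxOf?_eq_none_iff.mpr (hl ▸ kid_not_mem_own hn hc : c ∉ l)]
      · rcases exists_kid_of_mem hn hm hmn hmem with ⟨c₀, hc₀, hc₀l⟩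
        rcases kid_idx hn hm hc₀ hc₀l with ⟨d, hd, hdn⟩
        rw [hdn, if_pos hmem,
          sum_map_single hc₀ kids_nodup
            (by intro c hc hne
                rw [List.idxOf?_eq_none_iff.mpr
                  (fun hcl => hne (kid_unique hn hm hc hcl hc₀ hc₀l))]),
          hd]
        push_cast; ring
    · have hn_none : l.idxOf? n = none := List.idxOf?_eq_none_iff.mpr hmem
      rw [hn_none, if_neg hmem, sum_map_zero_of]
      · simp
      · intro c hc
        rw [List.idxOf?_eq_none_iff.mpr (fun hcl => hmem (mem_of_kid_mem hn hm hc hcl))]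

-- ----- summed recursion identities -----
lemma sum_range_eq_ind {masters : List Int} {n : Int} {ln : List Int}
    (hn : pvChainN masters n = some ln) :
    ((List.range (masters.length + 1)).map (fun m : Nat => if (m : Int) = n then (1 : Int) else 0)).sum = 1 := by
  have hb : 0 ≤ n ∧ n ≤ (masters.length : Int) := by
    rcases chn_head hn with ⟨t, rfl⟩
    exact chn_elem_bounds hn n (by simp)
  have hmem : n.toNat ∈ List.range (masters.length + 1) := by
    simp only [List.mem_range]; omega
  rw [sum_map_single hmem List.nodup_range
    (by intro y hy hne
        rw [if_neg (by simp only [List.mem_range] at hy; omega)])]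
  rw [if_pos (by omega)]

lemma S_rec {masters : List Int} {n : Int} {ln : List Int}
    (hn : pvChainN masters n = some ln) :
    pvS masters n = 1 + ((pvKids masters n).map (pvS masters)).sum := by
  unfold pvS
  rw [List.map_congr_left (fun (m : Nat) (_ : m ∈ List.range (masters.length + 1)) => pointwise_ind hn (m : Int)), List.sum_map_add,
    sum_range_eq_ind hn, sum_map_swap]

lemma W_rec {masters : List Int} {n : Int} {ln : List Int}
    (hn : pvChainN masters n = some ln) :
    pvW masters n = pvS masters n + ((pvKids masters n).map (pvW masters)).sum := by
  unfold pvW pvS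
  rw [List.map_congr_left (fun (m : Nat) (_ : m ∈ List.range (masters.length + 1)) => pointwise_wgt hn (m : Int)), List.sum_map_add,
    sum_map_swap]

-- ----- A-side: the graph and the dfs -----
def pvSub (masters : List Int) (n k : Int) : Bool :=
  match pvChainN masters k with
  | some lk => decide (n ∈ lk)
  | none => false

lemma foldl_graph (ps : List (Int × Int)) (g : PySem.Dict Int (List Int)) (n : Int) :
    ((ps.foldl (fun g p => g.modify (p.2 - 1) [] (fun l => l ++ [p.1 + 1])) g).getD n [])
      = g.getD n [] ++ ps.filterMap (fun p => if p.2 - 1 = n then some (p.1 + 1) else none) := by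
  induction ps generalizing g with
  | nil => simp
  | cons p ps ih =>
    rw [List.foldl_cons, ih, PySem.Dict.getD_modify, List.filterMap_cons]
    by_cases he : p.2 - 1 = n
    · rw [if_pos (he ▸ rfl : n = p.2 - 1), if_pos he, he]
      simp
    · rw [if_neg (fun hc => he hc.symm), if_neg he]

lemma graphA_getD (masters : List Int) (n : Int) :
    (pvGraphA masters).getD n [] = pvKids masters n := by
  unfold pvGraphA pvKids
  rw [foldl_graph]
  simp [PySem.Dict.getD_empty]

lemma pvSub_of_some {masters : List Int} {k : Int} {lk : List Int}
    (hk : pvChainN masters k = some lk) (n : Int) : pvSub masters n k = decide (n ∈ lk) := by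
  unfold pvSub; rw [hk]

lemma pvSub_of_none {masters : List Int} {k : Int}
    (hk : pvChainN masters k = none) (n : Int) : pvSub masters n k = false := by
  unfold pvSub; rw [hk]

lemma pvSub_self {masters : List Int} {n : Int} {ln : List Int}
    (hn : pvChainN masters n = some ln) : pvSub masters n n = true := by
  rcases chn_head hn with ⟨t, rfl⟩
  rw [pvSub_of_some hn]
  simp

lemma sub_unfold {masters : List Int} {n k : Int} {ln : List Int}
    (hn : pvChainN masters n = some ln) (hkn : k ≠ n) :
    pvSub masters n k = (pvKids masters n).any (fun c => pvSub masters c k) := by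
  cases hk : pvChainN masters k with
  | none =>
    simp only [pvSub_of_none hk]
    symm
    rw [List.any_eq_false]
    intro c _
    simp
  | some lk =>
    simp only [pvSub_of_some hk]
    by_cases hmem : n ∈ lk
    · rcases exists_kid_of_mem hn hk hkn hmem with ⟨c₀, hc₀, hc₀l⟩
      symm
      rw [decide_eq_true hmem, List.any_eq_true]
      exact ⟨c₀, hc₀, by simp [hc₀l]⟩
    · symm
      rw [decide_eq_false hmem, List.any_eq_false]
      intro c hc
      simp only [decide_eq_true_eq]
      exact fun hcl => hmem (mem_of_kid_mem hn hk hc hcl)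

lemma dfsA_fold (masters : List Int) (corps : Int) (_hpre : Pre_func corps masters) (f : Nat)
    (IH : ∀ (n : Int) (ln sizes : List Int), pvChainN masters n = some ln →
        masters.length + 2 ≤ f + ln.length → sizes.length = corps.toNat →
        (pvDfsA (pvGraphA masters) f n sizes).1 = pvS masters n ∧
        (pvDfsA (pvGraphA masters) f n sizes).2.1 = pvW masters n ∧
        (pvDfsA (pvGraphA masters) f n sizes).2.2.length = sizes.length ∧
        ∀ k : Nat, k < sizes.length →
          (pvDfsA (pvGraphA masters) f n sizes).2.2.getD k 0
            = if pvSub masters n (k : Int) then pvW masters (k : Int) else sizes.getD k 0)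
    (n : Int) (ln : List Int) (hn : pvChainN masters n = some ln)
    (hf : masters.length + 2 ≤ (f + 1) + ln.length) :
    ∀ (cs : List Int), cs ⊆ pvKids masters n → ∀ (sz ct : Int) (sizes : List Int),
      sizes.length = corps.toNat →
      ((cs.foldl (fun acc nb => let s := pvDfsA (pvGraphA masters) f nb acc.2.2;
          (acc.1 + s.1, acc.2.1 + s.2.1, s.2.2)) (sz, ct, sizes)).1
            = sz + (cs.map (pvS masters)).sum ∧
       (cs.foldl (fun acc nb => let s := pvDfsA (pvGraphA masters) f nb acc.2.2;
          (acc.1 + s.1, acc.2.1 + s.2.1, s.2.2)) (sz, ct, sizes)).2.1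
            = ct + (cs.map (pvW masters)).sum ∧
       (cs.foldl (fun acc nb => let s := pvDfsA (pvGraphA masters) f nb acc.2.2;
          (acc.1 + s.1, acc.2.1 + s.2.1, s.2.2)) (sz, ct, sizes)).2.2.length = sizes.length ∧
       ∀ k : Nat, k < sizes.length →
         (cs.foldl (fun acc nb => let s := pvDfsA (pvGraphA masters) f nb acc.2.2;
            (acc.1 + s.1, acc.2.1 + s.2.1, s.2.2)) (sz, ct, sizes)).2.2.getD k 0
           = if cs.any (fun c => pvSub masters c (k : Int)) then pvW masters (k : Int)
             else sizes.getD k 0) := by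
  intro cs
  induction cs with
  | nil =>
    intro _ sz ct sizes hlen
    simp
  | cons c cs ihc =>
    intro hsub sz ct sizes hlen
    have hc : c ∈ pvKids masters n := hsub (by simp)
    have hcc : pvChainN masters c = some (c :: ln) := chainN_kid hc hn
    obtain ⟨h1, h2, h3, h4⟩ := IH c (c :: ln) sizes hcc (by simp; omega) hlen
    rw [List.foldl_cons]
    obtain ⟨g1, g2, g3, g4⟩ := ihc (fun x hx => hsub (by simp [hx]))
      (sz + (pvDfsA (pvGraphA masters) f c sizes).1)
      (ct + (pvDfsA (pvGraphA masters) f c sizes).2.1)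
      (pvDfsA (pvGraphA masters) f c sizes).2.2
      (by rw [h3, hlen])
    refine ⟨?_, ?_, ?_, ?_⟩
    · rw [g1, h1, List.map_cons, List.sum_cons]; ring
    · rw [g2, h2, List.map_cons, List.sum_cons]; ring
    · rw [g3, h3]
    · intro k hk
      have hk2 : k < (pvDfsA (pvGraphA masters) f c sizes).2.2.length := by rw [h3]; exact hk
      rw [g4 k hk2, h4 k hk, List.any_cons]
      by_cases ha : cs.any (fun c => pvSub masters c (k : Int)) = true
      · simp [ha]
      · by_cases hsc : pvSub masters c (k : Int) = true
        · simp [hsc, ha]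
        · simp [hsc, ha]

lemma getD_set_helper (l : List Int) (i k : Nat) (v : Int) :
    (l.set i v).getD k 0 = if i = k ∧ i < l.length then v else l.getD k 0 := by
  rw [List.getD_eq_getElem?_getD, List.getElem?_set, List.getD_eq_getElem?_getD]
  rcases Nat.lt_or_ge k l.length with hk | hk
  · split_ifs <;> simp_all
  · rw [List.getElem?_eq_none (by omega)]
    split_ifs <;> simp_all
    omega

lemma dfsA_eval (masters : List Int) (corps : Int) (hpre : Pre_func corps masters) :
    ∀ (f : Nat) (n : Int) (ln sizes : List Int), pvChainN masters n = some ln →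
      masters.length + 2 ≤ f + ln.length → sizes.length = corps.toNat →
      (pvDfsA (pvGraphA masters) f n sizes).1 = pvS masters n ∧
      (pvDfsA (pvGraphA masters) f n sizes).2.1 = pvW masters n ∧
      (pvDfsA (pvGraphA masters) f n sizes).2.2.length = sizes.length ∧
      ∀ k : Nat, k < sizes.length →
        (pvDfsA (pvGraphA masters) f n sizes).2.2.getD k 0
          = if pvSub masters n (k : Int) then pvW masters (k : Int) else sizes.getD k 0 := by
  intro f
  induction f with
  | zero =>
    intro n ln sizes hn hf _
    have := chn_length_le hn
    omega
  | succ f ih =>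
    intro n ln sizes hn hf hlen
    obtain ⟨g1, g2, g3, g4⟩ := dfsA_fold masters corps hpre f ih n ln hn hf
      (pvKids masters n) (fun x hx => hx) 1 0 sizes hlen
    have hnb := chainN_lt_corps hpre hn
    simp only [pvDfsA, graphA_getD]
    refine ⟨?_, ?_, ?_, ?_⟩
    · rw [g1, S_rec hn]
    · rw [g2, g1, W_rec hn, S_rec hn]; ring
    · rw [PySem.List.length_pySetD, g3]
    · intro k hk
      have hv : (List.foldl (fun acc nb =>
          (acc.1 + (pvDfsA (pvGraphA masters) f nb acc.2.2).1,
            acc.2.1 + (pvDfsA (pvGraphA masters) f nb acc.2.2).2.1,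
            (pvDfsA (pvGraphA masters) f nb acc.2.2).2.2)) (1, 0, sizes) (pvKids masters n)).2.1
          + (List.foldl (fun acc nb =>
          (acc.1 + (pvDfsA (pvGraphA masters) f nb acc.2.2).1,
            acc.2.1 + (pvDfsA (pvGraphA masters) f nb acc.2.2).2.1,
            (pvDfsA (pvGraphA masters) f nb acc.2.2).2.2)) (1, 0, sizes) (pvKids masters n)).1
          = pvW masters n := by
        rw [g2, g1, W_rec hn, S_rec hn]; ring
      rw [PySem.List.pySetD_of_nonneg _ _ hnb.1, getD_set_helper]
      by_cases hkn : n.toNat = k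
      · rw [if_pos ⟨hkn, by rw [g3]; omega⟩]
        have hkin : (k : Int) = n := by omega
        rw [hkin, if_pos (pvSub_self hn), hv]
      · rw [if_neg (by intro hand; exact hkn hand.1), g4 k hk,
          sub_unfold hn (by omega : (k : Int) ≠ n)]

-- ----- B-side: the walk and the increments -----
lemma walkB_some {masters : List Int} :
    ∀ (f : Nat) (m : Int) (acc l : List Int), pvChn masters f m = some l →
      pvWalkB masters f m acc = (acc ++ l, true) := by
  intro f
  induction f with
  | zero => intro m acc l h; simp [pvChn] at h
  | succ f ih =>
    intro m acc l h
    by_cases h0 : m = 0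
    · simp [pvChn, h0] at h
      simp [pvWalkB, h0, ← h]
    · by_cases hr : m < 1 ∨ (masters.length : Int) < m
      · simp [pvChn, h0, hr] at h
      · simp only [pvChn, if_neg h0, if_neg hr] at h
        rcases Option.map_eq_some_iff.mp h with ⟨t, ht, rfl⟩
        simp only [pvWalkB, if_neg h0, if_neg hr]
        rw [ih _ _ _ ht]
        simp

lemma walkB_none {masters : List Int} :
    ∀ (f : Nat) (m : Int) (acc : List Int), pvChn masters f m = none →
      (pvWalkB masters f m acc).2 = false := by
  intro f
  induction f with
  | zero => intro m acc _; simp [pvWalkB]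
  | succ f ih =>
    intro m acc h
    by_cases h0 : m = 0
    · simp [pvChn, h0] at h
    · by_cases hr : m < 1 ∨ (masters.length : Int) < m
      · simp [pvWalkB, h0, hr]
      · simp only [pvChn, if_neg h0, if_neg hr] at h
        simp only [pvWalkB, if_neg h0, if_neg hr]
        exact ih _ _ (by simpa using h)

lemma addChainB_aux :
    ∀ (l : List Int) (res : List Int) (s : Int), 0 ≤ s → l.Nodup →
      (∀ a ∈ l, 0 ≤ a ∧ a < (res.length : Int)) →
      (((PySem.List.enumerate l s).foldl
          (fun r p => PySem.List.pySetD r p.2 (PySem.List.pyGetD r p.2 0 + (p.1 + 1))) res).length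
        = res.length ∧
       ∀ k : Nat, k < res.length →
        ((PySem.List.enumerate l s).foldl
          (fun r p => PySem.List.pySetD r p.2 (PySem.List.pyGetD r p.2 0 + (p.1 + 1))) res).getD k 0
          = res.getD k 0 + (match l.idxOf? (k : Int) with
              | some d => s + (d : Int) + 1
              | none => 0)) := by
  intro l
  induction l with
  | nil =>
    intro res s _ _ _
    simp [PySem.List.enumerate_nil]
  | cons x t ih =>
    intro res s hs hnd hb
    have hx := hb x (by simp)
    have hres1 : (PySem.List.pySetD res x (PySem.List.pyGetD res x 0 + (s + 1))).length = res.length :=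
      PySem.List.length_pySetD ..
    obtain ⟨ihlen, ihpt⟩ := ih (PySem.List.pySetD res x (PySem.List.pyGetD res x 0 + (s + 1))) (s + 1)
      (by omega) (List.nodup_cons.mp hnd).2
      (by intro a ha; rw [hres1]; exact hb a (by simp [ha]))
    rw [PySem.List.enumerate_cons, List.foldl_cons]
    refine ⟨by rw [ihlen, hres1], ?_⟩
    intro k hk
    rw [ihpt k (by rw [hres1]; exact hk)]
    have hsetk : (PySem.List.pySetD res x (PySem.List.pyGetD res x 0 + (s + 1))).getD k 0
        = if (k : Int) = x then res.getD k 0 + (s + 1) else res.getD k 0 := by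
      rw [PySem.List.pySetD_of_nonneg _ _ hx.1, getD_set_helper,
        PySem.List.pyGetD_of_nonneg _ _ hx.1]
      by_cases hkx : (k : Int) = x
      · rw [if_pos ⟨by omega, by omega⟩, if_pos hkx]
        have : x.toNat = k := by omega
        rw [this]
      · rw [if_neg (by intro hand; omega), if_neg hkx]
    rw [hsetk]
    by_cases hkx : (k : Int) = x
    · have hxt : x ∉ t := (List.nodup_cons.mp hnd).1
      rw [if_pos hkx, List.idxOf?_eq_none_iff.mpr (by rw [hkx]; exact hxt)]
      rw [hkx, List.idxOf?_cons]
      simp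
    · rw [if_neg hkx, List.idxOf?_cons, if_neg (by simp; omega)]
      cases hd : t.idxOf? (k : Int) with
      | none => simp
      | some d => simp; ring

lemma pvW_of_unreachable {masters : List Int} {k : Int}
    (hk : pvChainN masters k = none) : pvW masters k = 0 := by
  unfold pvW
  rw [sum_map_zero_of]
  intro m _
  unfold pvWgt
  cases hm : pvChainN masters (m : Int) with
  | none => simp
  | some l =>
    simp only []
    cases hi : l.idxOf? k with
    | none => rfl
    | some d =>
      exfalso
      have hkl : k ∈ l := by
        have := List.idxOf?_eq_none_iff (l := l) (a := k)
        by_contra hkl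
        rw [List.idxOf?_eq_none_iff.mpr hkl] at hi; cases hi
      rcases chainN_of_mem hm hkl with ⟨b, hb⟩
      rw [hb] at hk; cases hk

lemma altB_fold {corps : Int} {masters : List Int} (hpre : Pre_func corps masters) :
    ∀ (ms : List Int) (res : List Int), res.length = corps.toNat →
      ((ms.foldl (fun res m =>
          if (pvWalkB masters (masters.length + 1) m []).2
          then pvAddChainB res (pvWalkB masters (masters.length + 1) m []).1 else res) res).length
        = res.length ∧
       ∀ k : Nat, k < res.length →
        (ms.foldl (fun res m =>
          if (pvWalkB masters (masters.length + 1) m []).2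
          then pvAddChainB res (pvWalkB masters (masters.length + 1) m []).1 else res) res).getD k 0
          = res.getD k 0 + (ms.map (fun m => pvWgt masters m (k : Int))).sum) := by
  intro ms
  induction ms with
  | nil => intro res _; simp
  | cons m ms ih =>
    intro res hlen
    rw [List.foldl_cons]
    cases hc : pvChainN masters m with
    | none =>
      have hw := walkB_none (masters := masters) (masters.length + 1) m [] hc
      obtain ⟨ihlen, ihpt⟩ := ih res hlen
      rw [hw]
      refine ⟨by simpa using ihlen, ?_⟩
      intro k hk
      have hz : pvWgt masters m (k : Int) = 0 := by unfold pvWgt; rw [hc]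
      simp only [List.map_cons, List.sum_cons, hz, Bool.false_eq_true, if_false]
      rw [ihpt k hk]
      ring
    | some l =>
      have hw := walkB_some (masters := masters) (masters.length + 1) m [] l hc
      obtain ⟨alen, apt⟩ := addChainB_aux l res 0 le_rfl (chn_nodup hc)
        (by intro a ha
            have h1 := chn_elem_bounds hc a ha
            rcases chainN_of_mem hc ha with ⟨b, hb⟩
            have h2 := chainN_lt_corps hpre hb
            have h3 := hpre.1
            omega)
      have halen : (pvAddChainB res l).length = res.length := alen
      obtain ⟨ihlen, ihpt⟩ := ih (pvAddChainB res l) (by rw [halen, hlen])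
      rw [hw]
      simp only [List.nil_append, ite_true]
      refine ⟨by rw [ihlen, halen], ?_⟩
      intro k hk
      rw [ihpt k (by rw [halen]; exact hk)]
      have hapt : (pvAddChainB res l).getD k 0
          = res.getD k 0 + pvWgt masters m (k : Int) := by
        unfold pvAddChainB
        rw [apt k hk]
        have hw2 : pvWgt masters m (k : Int)
            = (match l.idxOf? (k : Int) with | some d => (d : Int) + 1 | none => 0) := by
          unfold pvWgt
          rw [hc]
        rw [hw2]
        cases l.idxOf? (k : Int) with
        | none => rfl
        | some d => simp only []; ring
      rw [hapt, List.map_cons, List.sum_cons]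
      ring

theorem func_spec : Claim_equal_func := by
  unfold Claim_equal_func Spec_func
  intro corps masters _ hpre
  have h0 : pvChainN masters 0 = some [0] := by
    simp [pvChainN, pvChn]
  obtain ⟨a1, a2, a3, a4⟩ := dfsA_eval masters corps hpre (masters.length + 1) 0 [0]
    (List.replicate corps.toNat 0) h0 (by simp) (by simp)
  obtain ⟨b3, b4⟩ := altB_fold hpre (PySem.List.pyRange 0 ((masters.length : Int) + 1) 1)
    (List.replicate corps.toNat 0) (by simp)
  have hfa : func_alt corps masters
      = (PySem.List.pyRange 0 ((masters.length : Int) + 1) 1).foldl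
          (fun res m =>
            if (pvWalkB masters (masters.length + 1) m []).2
            then pvAddChainB res (pvWalkB masters (masters.length + 1) m []).1 else res)
          (List.replicate corps.toNat 0) := rfl
  have hfA : func corps masters
      = (pvDfsA (pvGraphA masters) (masters.length + 1) 0 (List.replicate corps.toNat 0)).2.2 := rfl
  have hAlen : (func corps masters).length = corps.toNat := by
    rw [hfA, a3]; simp
  have hBlen : (func_alt corps masters).length = corps.toNat := by
    rw [hfa, b3]; simp
  have hsum : ∀ k : Nat,
      ((PySem.List.pyRange 0 ((masters.length : Int) + 1) 1).map
        (fun m => pvWgt masters m (k : Int))).sum = pvW masters (k : Int) := by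
    intro k
    have hr : PySem.List.pyRange 0 ((masters.length : Int) + 1) 1
        = (List.range (masters.length + 1)).map (fun m : Nat => (m : Int)) := by
      have := PySem.List.pyRange_zero_nat (masters.length + 1)
      push_cast at this ⊢
      exact this
    rw [hr, List.map_map]
    rfl
  have hpt : ∀ k : Nat, k < corps.toNat →
      (func corps masters).getD k 0 = (func_alt corps masters).getD k 0 := by
    intro k hk
    rw [hfA, hfa, a4 k (by simpa using hk), b4 k (by simpa using hk), hsum k,
      List.getD_replicate _ (by simpa using hk)]
    by_cases hs : pvSub masters 0 (k : Int) = true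
    · rw [if_pos hs]; ring
    · rw [if_neg hs]
      cases hck : pvChainN masters (k : Int) with
      | some lk =>
        exfalso
        apply hs
        rw [pvSub_of_some hck]
        exact decide_eq_true (chn_zero_mem hck)
      | none => rw [pvW_of_unreachable hck]; ring
  apply List.ext_getElem?
  intro i
  by_cases hi : i < corps.toNat
  · rw [List.getElem?_eq_getElem (by omega : i < (func corps masters).length),
      List.getElem?_eq_getElem (by omega : i < (func_alt corps masters).length)]
    have := hpt i hi
    rw [List.getD_eq_getElem _ _ (by omega), List.getD_eq_getElem _ _ (by omega)] at this
    exact congrArg some this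
  · rw [List.getElem?_eq_none (by omega), List.getElem?_eq_none (by omega)]
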